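-- pv_equiv track=rewrite | github.com/tinfoilsh/confidential-realtime-models | audio/audio_proxy.py | pick_realtime_subprotocol
-- ===== SOURCE A (Python) =====
-- _SENSITIVE_SUBPROTOCOL_PREFIXES = (
--     "openai-insecure-api-key.",
--     "openai-organization.",
--     "openai-project.",
-- )
--
-- def pick_realtime_subprotocol(offered: list[str] | None) -> str | None:
--     """Pick the subprotocol to echo back on a Realtime WebSocket handshake.
--
--     Chrome/Firefox enforce RFC 6455 strictly: when the client offers any
--     subprotocols, the server MUST echo back exactly one of them in the 101
--     response, otherwise the browser aborts with close code 1006. Safari is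
--     lenient and accepts a missing echo, which is why this only manifested on
--     Chromium-based browsers.
--
--     We prefer the "realtime" tag (matching OpenAI's own Realtime API) and
--     explicitly avoid echoing any auth-bearing subprotocol so the API key
--     isn't reflected in response headers.
--     """
--     if not offered:
--         return None
--     safe = [
--         proto for proto in offered
--         if proto and not proto.startswith(_SENSITIVE_SUBPROTOCOL_PREFIXES)
--     ]
--     if "realtime" in safe:
--         return "realtime"
--     return safe[0] if safe else None
-- ===== SOURCE B (Python) =====
-- _SENSITIVE_SUBPROTOCOL_PREFIXES = (
--     "openai-insecure-api-key.",
--     "openai-organization.",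
--     "openai-project.",
-- )
--
-- def _first_safe(protos):
--     """First entry that is truthy and not auth-bearing, or None (recursive)."""
--     if not protos:
--         return None
--     head = protos[0]
--     if head and not head.startswith(_SENSITIVE_SUBPROTOCOL_PREFIXES):
--         return head
--     return _first_safe(protos[1:])
--
-- def pick_realtime_subprotocol(offered):
--     if not offered:
--         return None
--     # "realtime" is always safe (non-empty, no sensitive prefix), so test
--     # membership directly on the offered list -- no filtered list needed.
--     if "realtime" in offered:
--         return "realtime"
--     return _first_safe(offered)
-- ===== Notes on version B (the rewrite author's own statement) =====
-- stated objective: faster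
-- what changed: Exploits that "realtime" is itself always safe: membership is tested directly on the offered list (no filtered list is ever built), and the fallback is a recursive early-return search for the first safe entry.
import Mathlib
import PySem

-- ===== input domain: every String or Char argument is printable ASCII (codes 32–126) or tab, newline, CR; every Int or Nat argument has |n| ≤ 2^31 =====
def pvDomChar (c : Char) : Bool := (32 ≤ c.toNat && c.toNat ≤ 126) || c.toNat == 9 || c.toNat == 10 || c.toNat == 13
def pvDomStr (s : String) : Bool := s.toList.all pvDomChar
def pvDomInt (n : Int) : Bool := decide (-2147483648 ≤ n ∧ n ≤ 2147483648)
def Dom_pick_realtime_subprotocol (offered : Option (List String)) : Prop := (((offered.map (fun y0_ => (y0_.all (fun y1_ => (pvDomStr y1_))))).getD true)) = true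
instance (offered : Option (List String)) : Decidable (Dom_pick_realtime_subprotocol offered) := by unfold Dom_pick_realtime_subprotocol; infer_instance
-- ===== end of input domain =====

-- ===== PORT A =====
-- B is simpler: "realtime" is itself always safe, so it tests membership on the
-- raw offered list and falls back to a recursive first-safe search; no filtered list.
def pvSensitive (p : String) : Bool :=
  PySem.Str.startswith p "openai-insecure-api-key." ||
  PySem.Str.startswith p "openai-organization." ||
  PySem.Str.startswith p "openai-project."

def pick_realtime_subprotocol (offered : Option (List String)) : Option String :=
  match offered with
  | none => none
  | some l =>
    if l = [] then none
    else
      let safe := l.filter (fun p => !(p = "") && !(pvSensitive p))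
      if "realtime" ∈ safe then some "realtime"
      else safe.head?

-- ===== PORT B =====
-- _first_safe: first entry that is truthy and not auth-bearing, or none (recursive)
def pvFirstSafe : List String → Option String
  | [] => none
  | head :: rest =>
    if !(head = "") && !(pvSensitive head) then some head
    else pvFirstSafe rest

def pick_realtime_subprotocol_alt (offered : Option (List String)) : Option String :=
  match offered with
  | none => none
  | some l =>
    if l = [] then none
    else if "realtime" ∈ l then some "realtime"
    else pvFirstSafe l

-- ===== PRECONDITION & SPEC =====
def Spec_pick_realtime_subprotocol (offered : Option (List String)) (out : Option String) : Prop := out = pick_realtime_subprotocol_alt offered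
instance (offered : Option (List String)) (out : Option String) : Decidable (Spec_pick_realtime_subprotocol offered out) := by unfold Spec_pick_realtime_subprotocol; infer_instance

-- ===== CLAIM (what is proved, stated in full; the proofs are below) =====
def Claim_equal_pick_realtime_subprotocol : Prop := ∀ (offered : Option (List String)), Dom_pick_realtime_subprotocol offered → Spec_pick_realtime_subprotocol offered (pick_realtime_subprotocol offered)

-- ===== LEMMAS AND PROOFS =====

-- membership in the filtered list coincides with membership in the raw list for "realtime"
lemma pvMem_filter_realtime (l : List String) :
    ("realtime" ∈ l.filter (fun p => !(p = "") && !(pvSensitive p))) ↔ "realtime" ∈ l := by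
  rw [List.mem_filter]
  constructor
  · exact fun h => h.1
  · exact fun h => ⟨h, by decide⟩

-- the head of the filtered list is the first safe element
lemma pvFirstSafe_eq_filter_head (l : List String) :
    pvFirstSafe l = (l.filter (fun p => !(p = "") && !(pvSensitive p))).head? := by
  induction l with
  | nil => rfl
  | cons p rest ih =>
    by_cases h : (!(decide (p = "")) && !(pvSensitive p)) = true
    · simp [pvFirstSafe, List.filter, h]
    · simp [pvFirstSafe, List.filter, h, ih]

-- ===== VERDICT (by name: the statement is the Claim_ definition above) =====
theorem pick_realtime_subprotocol_spec : Claim_equal_pick_realtime_subprotocol := by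
  intro offered _
  unfold Spec_pick_realtime_subprotocol
  cases offered with
  | none => rfl
  | some l =>
    simp only [pick_realtime_subprotocol, pick_realtime_subprotocol_alt]
    by_cases h : l = []
    · simp [h]
    · rw [if_neg h, if_neg h]
      by_cases hm : "realtime" ∈ l
      · rw [if_pos ((pvMem_filter_realtime l).mpr hm), if_pos hm]
      · rw [if_neg (fun hc => hm ((pvMem_filter_realtime l).mp hc)), if_neg hm,
          pvFirstSafe_eq_filter_head]
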